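-- pv_equiv track=rewrite | github.com/jorgegarcia197/CTCI-Python | AlgoExpert/Arrays/minimum_passes.py | minimum_passes_2
-- ===== SOURCE A (Python) =====
-- directions = [[-1, 0], [0, 1], [1, 0], [0, -1]]
--
-- def get_neighbors(matrix, row, col):
--     neighbors = []
--     for direction in directions:
--         newRow = row + direction[0]
--         newCol = col + direction[1]
--         if newRow < 0 or newRow >= len(matrix) or newCol < 0 or newCol >= len(matrix[0]):
--             continue
--         neighbors.append((newRow, newCol))
--     return neighbors
--
-- def containsNeg(matrix):
--     for row in range(len(matrix)):
--         for column in range(len(matrix[0])):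
--             if matrix[row][column] < 0:
--                 return True
--     return False
--
-- def getAllPositives(matrix):
--     stack = []
--     for row in range(len(matrix)):
--         for column in range(len(matrix[0])):
--             if matrix[row][column] > 0:
--                 stack.append((row, column))
--     return stack
--
-- def minimum_passes_2(matrix):
--     passes = 0
--     stack = getAllPositives(matrix)
--
--     while len(stack) > 0:
--         initial_length = len(stack)
--         passes += 1
--         second_stack = []
--         counter = 0
--         while counter < initial_length:
--             currentRow, currentColumn = stack.pop()
--
--             neighbors = get_neighbors(
--                 matrix, currentRow, currentColumn)
--             for neighbor in neighbors:
--                 row, col = neighbor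
--                 if matrix[row][col] < 0:
--                     matrix[row][col] = matrix[row][col] * -1
--
--                     second_stack.append((row, col))
--             counter += 1
--         stack = second_stack
--     return passes - 1 if not containsNeg(matrix) else -1
-- ===== SOURCE B (Python) =====
-- def minimum_passes_2(matrix):
--     # Whole-matrix sweep BFS: each pass simultaneously flips every negative
--     # cell that touches a positive cell (mutates matrix in place, like A).
--     rows = len(matrix)
--     width = len(matrix[0]) if matrix else 0
--     cells = [(r, c) for r in range(rows) for c in range(width)]
--     if not any(matrix[r][c] > 0 for r, c in cells):
--         return -1
--     passes = 0
--     while True: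
--         to_flip = [(r, c) for r, c in cells
--                    if matrix[r][c] < 0 and any(
--                        0 <= rr < rows and 0 <= cc < width and matrix[rr][cc] > 0
--                        for rr, cc in ((r - 1, c), (r + 1, c), (r, c - 1), (r, c + 1)))]
--         if not to_flip:
--             break
--         for r, c in to_flip:
--             matrix[r][c] = -matrix[r][c]
--         passes += 1
--     if any(matrix[r][c] < 0 for r, c in cells):
--         return -1
--     return passes
-- ===== Notes on version B (the rewrite author's own statement) =====
-- stated objective: simpler
-- what changed: A's double-buffered frontier stacks (pop-and-refill per layer, with helper passes for neighbours/positives/negatives) are replaced by repeated whole-matrix sweeps that simultaneously flip every negative cell touching a positive cell, counting sweeps until a fixed point.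
import Mathlib
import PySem

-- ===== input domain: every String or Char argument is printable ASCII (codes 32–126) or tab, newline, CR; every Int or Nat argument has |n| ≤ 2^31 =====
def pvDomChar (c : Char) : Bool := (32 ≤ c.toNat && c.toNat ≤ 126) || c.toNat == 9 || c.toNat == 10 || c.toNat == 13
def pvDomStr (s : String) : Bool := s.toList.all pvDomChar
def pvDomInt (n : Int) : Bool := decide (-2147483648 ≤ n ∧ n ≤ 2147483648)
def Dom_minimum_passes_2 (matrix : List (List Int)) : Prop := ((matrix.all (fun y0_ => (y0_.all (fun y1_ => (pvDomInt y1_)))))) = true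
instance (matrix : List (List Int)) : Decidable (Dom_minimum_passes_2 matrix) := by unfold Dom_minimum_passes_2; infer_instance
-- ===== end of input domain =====

-- B replaces A's double-buffered frontier stacks by repeated whole-matrix sweeps that
-- simultaneously flip every negative cell touching a positive one (simpler, not faster);
-- both mutate the Python matrix in place identically, equivalence is about the return value.

-- shared low-level grid accessors (matrix[r][c] read/write at nonnegative in-range indices)
def pvWidth (m : List (List Int)) : Nat := (m.getD 0 []).length
def pvGetP (m : List (List Int)) (p : Int × Int) : Int := (m.getD p.1.toNat []).getD p.2.toNat 0
def pvSetP (m : List (List Int)) (p : Int × Int) (v : Int) : List (List Int) :=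
  m.set p.1.toNat ((m.getD p.1.toNat []).set p.2.toNat v)

-- ===== PORT A =====
def pyDirections : List (Int × Int) := [(-1,0),(0,1),(1,0),(0,-1)]

def get_neighbors (matrix : List (List Int)) (row col : Int) : List (Int × Int) :=
  pyDirections.foldl (fun acc d =>
    let newRow := row + d.1
    let newCol := col + d.2
    if newRow < 0 ∨ (matrix.length : Int) ≤ newRow ∨ newCol < 0 ∨ (pvWidth matrix : Int) ≤ newCol
    then acc else acc ++ [(newRow, newCol)]) []

def containsNeg (matrix : List (List Int)) : Bool :=
  (List.range matrix.length).any fun (r : Nat) =>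
    (List.range (pvWidth matrix)).any fun (c : Nat) =>
      decide (pvGetP matrix (Int.ofNat r, Int.ofNat c) < 0)

def getAllPositives (matrix : List (List Int)) : List (Int × Int) :=
  (List.range matrix.length).foldl (fun stack (r : Nat) =>
    (List.range (pvWidth matrix)).foldl (fun stack (c : Nat) =>
      if 0 < pvGetP matrix (Int.ofNat r, Int.ofNat c)
      then stack ++ [(Int.ofNat r, Int.ofNat c)] else stack)
      stack) []

def pvFlipStep (st : List (List Int) × List (Int × Int)) (nb : Int × Int) :
    List (List Int) × List (Int × Int) :=
  if pvGetP st.1 nb < 0 then (pvSetP st.1 nb (pvGetP st.1 nb * -1), st.2 ++ [nb]) else st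

def passStep (m : List (List Int)) (cur : Int × Int) (second : List (Int × Int)) :
    List (List Int) × List (Int × Int) :=
  (get_neighbors m cur.1 cur.2).foldl pvFlipStep (m, second)

def passLoop : Nat → List (List Int) → List (Int × Int) → List (Int × Int) →
    List (List Int) × List (Int × Int)
  | 0, m, _, second => (m, second)
  | n+1, m, stack, second =>
    let cur := stack.getLastD (0, 0)
    let rest := stack.dropLast
    let st := passStep m cur second
    passLoop n st.1 rest st.2

-- fuel makes the while-loop total; it is provably never exhausted (rounds ≤ #negatives + 2)
def outerLoop : Nat → List (List Int) → List (Int × Int) → Int → List (List Int) × Int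
  | 0, m, _, passes => (m, passes)
  | f+1, m, stack, passes =>
    if stack.isEmpty then (m, passes)
    else
      let st := passLoop stack.length m stack []
      outerLoop f st.1 st.2 (passes + 1)

def minimum_passes_2 (matrix : List (List Int)) : Int :=
  let stack := getAllPositives matrix
  let res := outerLoop (matrix.length * pvWidth matrix + 2) matrix stack 0
  if containsNeg res.1 then -1 else res.2 - 1

-- ===== PORT B =====
def bCells (rows width : Nat) : List (Int × Int) :=
  (List.range rows).flatMap fun r => (List.range width).map fun c => (Int.ofNat r, Int.ofNat c)

def bNbrs (p : Int × Int) : List (Int × Int) :=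
  [(p.1 - 1, p.2), (p.1 + 1, p.2), (p.1, p.2 - 1), (p.1, p.2 + 1)]

def bHasPosNbr (m : List (List Int)) (rows width : Nat) (p : Int × Int) : Bool :=
  (bNbrs p).any fun q =>
    decide (0 ≤ q.1 ∧ q.1 < (rows : Int) ∧ 0 ≤ q.2 ∧ q.2 < (width : Int) ∧ 0 < pvGetP m q)

def bToFlip (m : List (List Int)) (rows width : Nat) : List (Int × Int) :=
  (bCells rows width).filter fun p => decide (pvGetP m p < 0) && bHasPosNbr m rows width p

def bFlipAll (m : List (List Int)) (t : List (Int × Int)) : List (List Int) :=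
  t.foldl (fun m p => pvSetP m p (-(pvGetP m p))) m

-- fuel makes the while-True-loop total; it is provably never exhausted
def bLoop (rows width : Nat) : Nat → List (List Int) → Int → List (List Int) × Int
  | 0, m, passes => (m, passes)
  | f+1, m, passes =>
    let t := bToFlip m rows width
    if t.isEmpty then (m, passes)
    else bLoop rows width f (bFlipAll m t) (passes + 1)

def minimum_passes_2_alt (matrix : List (List Int)) : Int :=
  let rows := matrix.length
  let width := pvWidth matrix
  let cells := bCells rows width
  if !(cells.any fun p => decide (0 < pvGetP matrix p)) then -1
  else
    let res := bLoop rows width (rows * width + 2) matrix 0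
    if cells.any (fun p => decide (pvGetP res.1 p < 0)) then -1 else res.2

-- ===== PRECONDITION & SPEC =====
-- Pre_ excludes exactly the ragged matrices with a row shorter than the first row,
-- on which the Python A raises IndexError (it scans every row up to len(matrix[0])).
def Pre_minimum_passes_2 (matrix : List (List Int)) : Prop :=
  ∀ row ∈ matrix, (matrix.getD 0 []).length ≤ row.length
instance (matrix : List (List Int)) : Decidable (Pre_minimum_passes_2 matrix) := by
  unfold Pre_minimum_passes_2; infer_instance

def pvWitness_minimum_passes_2 : List (List Int) := [[1, -1], [0, -2]]

def Spec_minimum_passes_2 (matrix : List (List Int)) (out : Int) : Prop :=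
  out = minimum_passes_2_alt matrix
instance (matrix : List (List Int)) (out : Int) : Decidable (Spec_minimum_passes_2 matrix out) := by
  unfold Spec_minimum_passes_2; infer_instance

-- ===== CLAIM (what is proved, stated in full; the proofs are below) =====
def Claim_equal_minimum_passes_2 : Prop :=
  ∀ (matrix : List (List Int)), Dom_minimum_passes_2 matrix → Pre_minimum_passes_2 matrix →
    Spec_minimum_passes_2 matrix (minimum_passes_2 matrix)

-- ===== LEMMAS AND PROOFS =====

-- grid vocabulary for the proofs
def pvNonneg (p : Int × Int) : Prop := 0 ≤ p.1 ∧ 0 ≤ p.2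
def pvInG (R W : Nat) (p : Int × Int) : Prop :=
  0 ≤ p.1 ∧ p.1 < (R : Int) ∧ 0 ≤ p.2 ∧ p.2 < (W : Int)
def pvSameShape (a b : List (List Int)) : Prop :=
  b.length = a.length ∧ ∀ i, (b.getD i []).length = (a.getD i []).length
-- cells of m that are negative and adjacent to a member of S (what one round flips)
def pvNA (R W : Nat) (m : List (List Int)) (S : List (Int × Int)) (p : Int × Int) : Prop :=
  pvInG R W p ∧ pvGetP m p < 0 ∧ ∃ s ∈ S, p ∈ bNbrs s
-- A-side loop invariant: frontier cells are positive in-grid cells, and every positive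
-- in-grid neighbour of a negative cell is in the frontier
def pvInv (R W : Nat) (m : List (List Int)) (S : List (Int × Int)) : Prop :=
  (∀ p ∈ S, pvInG R W p ∧ 0 < pvGetP m p) ∧
  (∀ x q : Int × Int, pvInG R W x → pvGetP m x < 0 →
    pvInG R W q → q ∈ bNbrs x → 0 < pvGetP m q → q ∈ S)
def pvNegCount (R W : Nat) (m : List (List Int)) : Nat :=
  ((bCells R W).filter fun p => decide (pvGetP m p < 0)).length
-- sequential processing of A's stack in pop (reverse) order, for the proofs
def passRev : List (Int × Int) → List (List Int) → List (Int × Int) →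
    List (List Int) × List (Int × Int)
  | [], m, s => (m, s)
  | p :: rest, m, s =>
    let st := passStep m p s
    passRev rest st.1 st.2

-- ---- low-level getD/set facts ----
lemma pv_getD_set_row (l : List (List Int)) (i j : Nat) (a : List Int) :
    ((l.set i a).getD j []) = if i = j ∧ i < l.length then a else l.getD j [] := by
  simp [List.getD_eq_getElem?_getD, List.getElem?_set]
  split_ifs <;> simp_all
  omega

lemma pv_getD_set_int (l : List Int) (i j : Nat) (v : Int) :
    ((l.set i v).getD j 0) = if i = j ∧ i < l.length then v else l.getD j 0 := by
  simp [List.getD_eq_getElem?_getD, List.getElem?_set]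
  split_ifs <;> simp_all
  omega

lemma pv_shape_refl (m : List (List Int)) : pvSameShape m m := ⟨rfl, fun _ => rfl⟩

lemma pv_shape_trans {a b c : List (List Int)} (h1 : pvSameShape a b) (h2 : pvSameShape b c) :
    pvSameShape a c := ⟨h2.1.trans h1.1, fun i => (h2.2 i).trans (h1.2 i)⟩

lemma pv_shape_set (m : List (List Int)) (p : Int × Int) (v : Int) :
    pvSameShape m (pvSetP m p v) := by
  refine ⟨by simp [pvSetP], fun i => ?_⟩
  rw [pvSetP, pv_getD_set_row]
  split_ifs with h
  · rw [← h.1]; simp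
  · rfl

lemma pv_width_of_shape {a b : List (List Int)} (h : pvSameShape a b) : pvWidth b = pvWidth a := by
  simpa [pvWidth] using h.2 0

lemma pv_neg_in_range (m : List (List Int)) (p : Int × Int) (h : pvGetP m p ≠ 0) :
    p.1.toNat < m.length ∧ p.2.toNat < (m.getD p.1.toNat []).length := by
  unfold pvGetP at h
  constructor
  · by_contra hr
    have he : m.getD p.1.toNat [] = [] := List.getD_eq_default _ _ (by omega)
    rw [he] at h
    simp at h
  · by_contra hc
    rw [List.getD_eq_default _ _ (by omega)] at h
    exact h rfl

lemma pv_get_set (m : List (List Int)) (p q : Int × Int) (v : Int)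
    (hp : pvNonneg p) (hq : pvNonneg q)
    (hr : p.1.toNat < m.length) (hc : p.2.toNat < (m.getD p.1.toNat []).length) :
    pvGetP (pvSetP m p v) q = if q = p then v else pvGetP m q := by
  unfold pvGetP pvSetP
  rw [pv_getD_set_row]
  by_cases hqp : q = p
  · subst hqp
    rw [if_pos rfl, if_pos ⟨rfl, hr⟩, pv_getD_set_int, if_pos ⟨rfl, hc⟩]
  · rw [if_neg hqp]
    have hne : ¬(q.1.toNat = p.1.toNat ∧ q.2.toNat = p.2.toNat) := by
      rw [Prod.ext_iff] at hqp
      rcases hq with ⟨h1, h2⟩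
      rcases hp with ⟨h3, h4⟩
      omega
    split_ifs with h
    · obtain ⟨h1, h2⟩ := h
      rw [pv_getD_set_int, if_neg (by omega), h1]
    · rfl


-- ---- A's neighbour list: membership, nodup ----
lemma pv_mem_get_neighbors (m : List (List Int)) (row col : Int) (q : Int × Int) :
    q ∈ get_neighbors m row col ↔
      pvInG m.length (pvWidth m) q ∧ q ∈ bNbrs (row, col) := by
  obtain ⟨a, b⟩ := q
  unfold get_neighbors pyDirections
  simp only [List.foldl]
  split_ifs <;>
    simp_all [bNbrs, pvInG, Prod.ext_iff] <;> omega

lemma pv_nodup_get_neighbors (m : List (List Int)) (row col : Int) :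
    (get_neighbors m row col).Nodup := by
  unfold get_neighbors pyDirections
  simp only [List.foldl]
  split_ifs
  all_goals simp [List.Nodup, Prod.ext_iff]
  all_goals try omega
  all_goals exact ⟨by rintro a b h1 h2; omega, by rintro a b h1 h2; omega⟩

lemma pv_inG_nonneg {R W : Nat} {p : Int × Int} (h : pvInG R W p) : pvNonneg p :=
  ⟨h.1, h.2.2.1⟩

-- ---- sequential conditional flipping of a nodup list of cells, characterised ----
lemma pv_flipFold_char (l : List (Int × Int)) : ∀ (m : List (List Int)) (s : List (Int × Int)),
    l.Nodup → (∀ x ∈ l, pvNonneg x) →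
    pvSameShape m (l.foldl pvFlipStep (m, s)).1 ∧
    (∀ q, pvNonneg q →
      pvGetP (l.foldl pvFlipStep (m, s)).1 q =
        if q ∈ l ∧ pvGetP m q < 0 then -pvGetP m q else pvGetP m q) ∧
    (l.foldl pvFlipStep (m, s)).2 = s ++ l.filter (fun x => decide (pvGetP m x < 0)) := by
  induction l with
  | nil => intro m s _ _; exact ⟨pv_shape_refl m, by simp, by simp⟩
  | cons x rest ih =>
    intro m s hnd hnn
    have hxnn : pvNonneg x := hnn x (by simp)
    have hrestnn : ∀ y ∈ rest, pvNonneg y := fun y hy => hnn y (by simp [hy])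
    have hxnotin : x ∉ rest := (List.nodup_cons.mp hnd).1
    have hrestnd : rest.Nodup := (List.nodup_cons.mp hnd).2
    simp only [List.foldl_cons]
    by_cases hneg : pvGetP m x < 0
    · obtain ⟨hr, hc⟩ := pv_neg_in_range m x (by omega)
      have hstep : pvFlipStep (m, s) x = (pvSetP m x (pvGetP m x * -1), s ++ [x]) := by
        simp [pvFlipStep, hneg]
      rw [hstep]
      have hget1 : ∀ q, pvNonneg q →
          pvGetP (pvSetP m x (pvGetP m x * -1)) q =
            if q = x then -pvGetP m x else pvGetP m q := by
        intro q hq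
        rw [pv_get_set m x q _ hxnn hq hr hc]
        split_ifs <;> [ring; rfl]
      obtain ⟨ihsh, ihget, ihsec⟩ := ih (pvSetP m x (pvGetP m x * -1)) (s ++ [x]) hrestnd hrestnn
      refine ⟨pv_shape_trans (pv_shape_set m x _) ihsh, ?_, ?_⟩
      · intro q hq
        rw [ihget q hq, hget1 q hq]
        by_cases hqx : q = x
        · subst hqx
          simp [hxnotin, hneg]
        · simp [List.mem_cons, hqx]
      · rw [ihsec]
        have hf : rest.filter (fun y => decide (pvGetP (pvSetP m x (pvGetP m x * -1)) y < 0)) =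
            rest.filter (fun y => decide (pvGetP m y < 0)) := by
          apply List.filter_congr
          intro y hy
          rw [hget1 y (hrestnn y hy),
            if_neg (show ¬ y = x from fun he => hxnotin (he ▸ hy))]
        rw [hf]
        simp [hneg]
    · have hstep : pvFlipStep (m, s) x = (m, s) := by
        simp [pvFlipStep, hneg]
      rw [hstep]
      obtain ⟨ihsh, ihget, ihsec⟩ := ih m s hrestnd hrestnn
      refine ⟨ihsh, ?_, ?_⟩
      · intro q hq
        rw [ihget q hq]
        by_cases hqx : q = x
        · subst hqx
          simp [hxnotin, hneg]
        · simp only [List.mem_cons, hqx, false_or]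
      · rw [ihsec]
        simp [hneg]

-- ---- one frontier cell processed (A's inner for-loop), characterised ----
lemma pv_passStep_char (m : List (List Int)) (cur : Int × Int) (s : List (Int × Int)) :
    pvSameShape m (passStep m cur s).1 ∧
    (∀ q, pvNonneg q →
      (q ∈ bNbrs cur ∧ pvInG m.length (pvWidth m) q ∧ pvGetP m q < 0 →
        pvGetP (passStep m cur s).1 q = -pvGetP m q) ∧
      (¬(q ∈ bNbrs cur ∧ pvInG m.length (pvWidth m) q ∧ pvGetP m q < 0) →
        pvGetP (passStep m cur s).1 q = pvGetP m q)) ∧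
    (∀ x, x ∈ (passStep m cur s).2 ↔
      x ∈ s ∨ (x ∈ bNbrs cur ∧ pvInG m.length (pvWidth m) x ∧ pvGetP m x < 0)) := by
  unfold passStep
  have hmem : ∀ q, q ∈ get_neighbors m cur.1 cur.2 ↔
      pvInG m.length (pvWidth m) q ∧ q ∈ bNbrs cur := fun q => by
    rw [pv_mem_get_neighbors m cur.1 cur.2 q]
  obtain ⟨hsh, hget, hsec⟩ := pv_flipFold_char (get_neighbors m cur.1 cur.2) m s
    (pv_nodup_get_neighbors m cur.1 cur.2)
    (fun x hx => pv_inG_nonneg ((hmem x).mp hx).1)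
  refine ⟨hsh, ?_, ?_⟩
  · intro q hq
    constructor
    · rintro ⟨h1, h2, h3⟩
      rw [hget q hq, if_pos ⟨(hmem q).mpr ⟨h2, h1⟩, h3⟩]
    · intro hcond
      rw [hget q hq, if_neg ?_]
      rintro ⟨hin, hneg⟩
      exact hcond ⟨((hmem q).mp hin).2, ((hmem q).mp hin).1, hneg⟩
  · intro x
    rw [hsec]
    simp only [List.mem_append, List.mem_filter, hmem x, decide_eq_true_eq]
    tauto

lemma pv_bNbrs_symm (p q : Int × Int) : q ∈ bNbrs p ↔ p ∈ bNbrs q := by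
  obtain ⟨a, b⟩ := p; obtain ⟨c, d⟩ := q
  simp [bNbrs, Prod.ext_iff]
  omega

-- ---- one whole round of A (stack processed in pop order), characterised ----
lemma pv_passRev_char (S : List (Int × Int)) : ∀ (m : List (List Int)) (s : List (Int × Int)),
    pvSameShape m (passRev S m s).1 ∧
    (∀ q, pvNonneg q →
      (pvNA m.length (pvWidth m) m S q → pvGetP (passRev S m s).1 q = -pvGetP m q) ∧
      (¬ pvNA m.length (pvWidth m) m S q → pvGetP (passRev S m s).1 q = pvGetP m q)) ∧
    (∀ x, x ∈ (passRev S m s).2 ↔ x ∈ s ∨ pvNA m.length (pvWidth m) m S x) := by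
  induction S with
  | nil =>
    intro m s
    refine ⟨pv_shape_refl m, fun q hq => ⟨fun h => ?_, fun _ => rfl⟩, fun x => by simp [passRev, pvNA]⟩
    · rcases h with ⟨_, _, s', hs', _⟩
      simp at hs'
  | cons p rest ih =>
    intro m s
    simp only [passRev]
    obtain ⟨hsh1, hget1, hsec1⟩ := pv_passStep_char m p s
    obtain ⟨ihsh, ihget, ihsec⟩ := ih (passStep m p s).1 (passStep m p s).2
    have hR : (passStep m p s).1.length = m.length := hsh1.1
    have hW : pvWidth (passStep m p s).1 = pvWidth m := pv_width_of_shape hsh1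
    rw [hR, hW] at ihget ihsec
    -- get of a cell of the step matrix vs the original
    refine ⟨pv_shape_trans hsh1 ihsh, ?_, ?_⟩
    · intro q hq
      obtain ⟨hg1, hg2⟩ := hget1 q hq
      obtain ⟨ig1, ig2⟩ := ihget q hq
      constructor
      · rintro ⟨hin, hneg, s', hs', hadj⟩
        rcases List.mem_cons.mp hs' with rfl | hs'
        · -- flipped by the head step
          rw [ig2, hg1 ⟨hadj, hin, hneg⟩]
          rintro ⟨_, hneg', _⟩
          rw [hg1 ⟨hadj, hin, hneg⟩] at hneg'
          omega
        · by_cases hstep : q ∈ bNbrs p ∧ pvInG m.length (pvWidth m) q ∧ pvGetP m q < 0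
          · rw [ig2, hg1 hstep]
            rintro ⟨_, hneg', _⟩
            rw [hg1 hstep] at hneg'
            omega
          · rw [ig1 ⟨hin, by rw [hg2 hstep]; exact hneg, s', hs', hadj⟩, hg2 hstep]
      · intro hna
        by_cases hstep : q ∈ bNbrs p ∧ pvInG m.length (pvWidth m) q ∧ pvGetP m q < 0
        · exact absurd ⟨hstep.2.1, hstep.2.2, p, by simp, hstep.1⟩ hna
        · rw [ig2, hg2 hstep]
          rintro ⟨hin, hneg, s', hs', hadj⟩
          rw [hg2 hstep] at hneg
          exact hna ⟨hin, hneg, s', List.mem_cons_of_mem p hs', hadj⟩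
    · intro x
      rw [ihsec x, hsec1 x]
      by_cases hxnn : pvNonneg x
      · obtain ⟨hg1, hg2⟩ := hget1 x hxnn
        constructor
        · rintro ((hx | hstep) | hna)
          · exact Or.inl hx
          · exact Or.inr ⟨hstep.2.1, hstep.2.2, p, by simp, hstep.1⟩
          · rcases hna with ⟨hin, hneg, s', hs', hadj⟩
            by_cases hstep : x ∈ bNbrs p ∧ pvInG m.length (pvWidth m) x ∧ pvGetP m x < 0
            · exact Or.inr ⟨hstep.2.1, hstep.2.2, p, by simp, hstep.1⟩
            · rw [hg2 hstep] at hneg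
              exact Or.inr ⟨hin, hneg, s', List.mem_cons_of_mem p hs', hadj⟩
        · rintro (hx | ⟨hin, hneg, s', hs', hadj⟩)
          · exact Or.inl (Or.inl hx)
          · rcases List.mem_cons.mp hs' with rfl | hs'
            · exact Or.inl (Or.inr ⟨hadj, hin, hneg⟩)
            · by_cases hstep : x ∈ bNbrs p ∧ pvInG m.length (pvWidth m) x ∧ pvGetP m x < 0
              · exact Or.inl (Or.inr hstep)
              · exact Or.inr ⟨hin, by rw [hg2 hstep]; exact hneg, s', hs', hadj⟩
      · -- x has a negative coordinate: it is in neither side beyond s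
        have hnotin : ∀ (T : List (Int × Int)) (mm : List (List Int)) R W,
            ¬ pvNA R W mm T x := by
          rintro T mm R W ⟨hin, _, _⟩
          exact hxnn (pv_inG_nonneg hin)
        constructor
        · rintro ((hx | hstep) | hna)
          · exact Or.inl hx
          · exact absurd (pv_inG_nonneg hstep.2.1) hxnn
          · exact absurd hna (hnotin _ _ _ _)
        · rintro (hx | hna)
          · exact Or.inl (Or.inl hx)
          · exact absurd hna (hnotin _ _ _ _)

-- A's counter/pop inner while-loop is sequential processing of the reversed stack
lemma pv_passLoop_eq (l : List (Int × Int)) : ∀ (m : List (List Int)) (s : List (Int × Int)),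
    passLoop l.length m l s = passRev l.reverse m s := by
  induction l using List.reverseRecOn with
  | nil => intro m s; simp [passLoop, passRev]
  | append_singleton l a ih =>
    intro m s
    have h1 : (l ++ [a]).length = l.length + 1 := by simp
    rw [h1]
    show passLoop (l.length + 1) m (l ++ [a]) s = _
    simp only [passLoop, List.getLastD_concat, List.dropLast_concat, List.reverse_append,
      List.reverse_singleton, List.singleton_append, passRev]
    exact ih _ _

lemma pv_mem_bCells (R W : Nat) (p : Int × Int) : p ∈ bCells R W ↔ pvInG R W p := by
  obtain ⟨a, b⟩ := p
  simp only [bCells, List.mem_flatMap, List.mem_map, List.mem_range, pvInG, Prod.mk.injEq,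
    Int.ofNat_eq_natCast]
  constructor
  · rintro ⟨r, hr, c, hc, rfl, rfl⟩
    refine ⟨by omega, by exact_mod_cast hr, by omega, by exact_mod_cast hc⟩
  · rintro ⟨h1, h2, h3, h4⟩
    exact ⟨a.toNat, by omega, b.toNat, by omega, by simp [Int.toNat_of_nonneg, h1, h3], by
      simp [Int.toNat_of_nonneg, h1, h3]⟩

lemma pv_nodup_bCells (R W : Nat) : (bCells R W).Nodup := by
  induction R with
  | zero => simp [bCells]
  | succ n ih =>
    rw [bCells, List.range_succ, List.flatMap_append]
    refine List.Nodup.append ?_ ?_ ?_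
    · exact ih
    · simp only [List.flatMap_singleton]
      exact List.Nodup.map (fun a b h => by simpa using h) (List.nodup_range)
    · intro x hx hy
      simp only [bCells, List.mem_flatMap, List.mem_map, List.mem_range] at hx
      simp only [List.flatMap_singleton, List.mem_map, List.mem_range] at hy
      obtain ⟨r, hr, c, hc, rfl⟩ := hx
      obtain ⟨c', hc', h⟩ := hy
      simp at h
      omega

-- ---- B's simultaneous flip of a nodup list of negative cells, characterised ----
lemma pv_flipAll_char (l : List (Int × Int)) : ∀ (m : List (List Int)),
    l.Nodup → (∀ x ∈ l, pvNonneg x ∧ pvGetP m x < 0) →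
    pvSameShape m (bFlipAll m l) ∧
    (∀ q, pvNonneg q →
      (q ∈ l → pvGetP (bFlipAll m l) q = -pvGetP m q) ∧
      (q ∉ l → pvGetP (bFlipAll m l) q = pvGetP m q)) := by
  induction l with
  | nil => intro m _ _; exact ⟨pv_shape_refl m, fun q _ => ⟨fun h => by simp at h, fun _ => rfl⟩⟩
  | cons x rest ih =>
    intro m hnd hl
    obtain ⟨hxnn, hxneg⟩ := hl x (by simp)
    have hxnotin : x ∉ rest := (List.nodup_cons.mp hnd).1
    obtain ⟨hr, hc⟩ := pv_neg_in_range m x (by omega)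
    rw [show bFlipAll m (x :: rest) = bFlipAll (pvSetP m x (-pvGetP m x)) rest from rfl]
    have hget1 : ∀ q, pvNonneg q →
        pvGetP (pvSetP m x (-pvGetP m x)) q = if q = x then -pvGetP m x else pvGetP m q :=
      fun q hq => pv_get_set m x q _ hxnn hq hr hc
    have hl' : ∀ y ∈ rest, pvNonneg y ∧ pvGetP (pvSetP m x (-pvGetP m x)) y < 0 := by
      intro y hy
      obtain ⟨hynn, hyneg⟩ := hl y (by simp [hy])
      refine ⟨hynn, ?_⟩
      rw [hget1 y hynn, if_neg (show ¬ y = x from fun he => hxnotin (he ▸ hy))]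
      exact hyneg
    obtain ⟨ihsh, ihget⟩ := ih (pvSetP m x (-pvGetP m x)) (List.nodup_cons.mp hnd).2 hl'
    refine ⟨pv_shape_trans (pv_shape_set m x _) ihsh, ?_⟩
    intro q hq
    constructor
    · intro hqin
      rcases List.mem_cons.mp hqin with rfl | hqin'
      · rw [(ihget q hq).2 hxnotin, hget1 q hq, if_pos rfl]
      · rw [(ihget q hq).1 hqin', hget1 q hq,
          if_neg (show ¬ q = x from fun he => hxnotin (he ▸ hqin'))]
    · intro hqout
      rw [(ihget q hq).2 (fun h => hqout (List.mem_cons_of_mem x h)), hget1 q hq,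
        if_neg (show ¬ q = x from fun he => hqout (he ▸ List.mem_cons_self ..))]

-- two same-shaped modifications of a matrix agreeing pointwise are equal
lemma pv_eq_of_shape_get (m a b : List (List Int))
    (ha : pvSameShape m a) (hb : pvSameShape m b)
    (h : ∀ p : Int × Int, pvNonneg p → pvGetP a p = pvGetP b p) : a = b := by
  apply List.ext_getElem (by rw [ha.1, hb.1])
  intro i h1 h2
  apply List.ext_getElem
  · have e1 := ha.2 i
    have e2 := hb.2 i
    rw [List.getD_eq_getElem a [] h1] at e1
    rw [List.getD_eq_getElem b [] h2] at e2
    rw [e1, e2]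
  · intro j hj1 hj2
    have hp := h (Int.ofNat i, Int.ofNat j)
      ⟨by exact Int.natCast_nonneg i, by exact Int.natCast_nonneg j⟩
    unfold pvGetP at hp
    simp only [Int.ofNat_eq_natCast, Int.toNat_natCast] at hp
    rw [List.getD_eq_getElem a [] h1, List.getD_eq_getElem b [] h2,
      List.getD_eq_getElem _ 0 hj1, List.getD_eq_getElem _ 0 hj2] at hp
    exact hp

lemma pv_outerLoop_nil (f : Nat) (m : List (List Int)) (p : Int) :
    outerLoop f m [] p = (m, p) := by
  cases f <;> simp [outerLoop]

lemma pv_inv_preserved (R W : Nat) (m m' : List (List Int)) (S T : List (Int × Int))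
    (hInv : pvInv R W m S)
    (hget : ∀ q, pvNonneg q → (pvNA R W m S q → pvGetP m' q = -pvGetP m q) ∧
      (¬ pvNA R W m S q → pvGetP m' q = pvGetP m q))
    (hT : ∀ x, x ∈ T ↔ pvNA R W m S x) : pvInv R W m' T := by
  constructor
  · intro p hp
    have hna := (hT p).mp hp
    have hflip := (hget p (pv_inG_nonneg hna.1)).1 hna
    have hneg := hna.2.1
    exact ⟨hna.1, by rw [hflip]; omega⟩
  · intro x q hxin hxneg hqin hadj hqpos
    have hxnn := pv_inG_nonneg hxin
    have hqnn := pv_inG_nonneg hqin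
    by_cases hxna : pvNA R W m S x
    · rw [(hget x hxnn).1 hxna] at hxneg
      have := hxna.2.1
      omega
    · have hxm : pvGetP m' x = pvGetP m x := (hget x hxnn).2 hxna
      rw [hxm] at hxneg
      by_cases hqna : pvNA R W m S q
      · exact (hT q).mpr hqna
      · have hqm : pvGetP m' q = pvGetP m q := (hget q hqnn).2 hqna
        rw [hqm] at hqpos
        have hqS : q ∈ S := hInv.2 x q hxin hxneg hqin hadj hqpos
        exact absurd ⟨hxin, hxneg, q, hqS, (pv_bNbrs_symm x q).mp hadj⟩ hxna

lemma pv_countP_lt {α : Type} (l : List α) (p q : α → Bool)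
    (hmono : ∀ x ∈ l, q x = true → p x = true)
    (x : α) (hx : x ∈ l) (hpx : p x = true) (hqx : q x = false) :
    l.countP q < l.countP p := by
  obtain ⟨l1, l2, rfl⟩ := List.append_of_mem hx
  rw [List.countP_append, List.countP_append, List.countP_cons, List.countP_cons, hpx, hqx]
  have h1 : l1.countP q ≤ l1.countP p :=
    List.countP_mono_left (fun a ha h => hmono a (by simp [ha]) h)
  have h2 : l2.countP q ≤ l2.countP p :=
    List.countP_mono_left (fun a ha h => hmono a (by simp [ha, List.mem_append]) h)
  simp
  omega

lemma pv_negCount_lt (R W : Nat) (m m' : List (List Int)) (S : List (Int × Int))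
    (hget : ∀ q, pvNonneg q → (pvNA R W m S q → pvGetP m' q = -pvGetP m q) ∧
      (¬ pvNA R W m S q → pvGetP m' q = pvGetP m q))
    (x : Int × Int) (hxna : pvNA R W m S x) :
    pvNegCount R W m' < pvNegCount R W m := by
  unfold pvNegCount
  rw [← List.countP_eq_length_filter, ← List.countP_eq_length_filter]
  apply pv_countP_lt _ _ _ ?_ x ((pv_mem_bCells R W x).mpr hxna.1)
    (by simpa using hxna.2.1) ?_
  · intro y hy hyneg
    have hynn := pv_inG_nonneg ((pv_mem_bCells R W y).mp hy)
    simp only [decide_eq_true_eq] at hyneg ⊢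
    by_cases hyna : pvNA R W m S y
    · rw [(hget y hynn).1 hyna] at hyneg
      have := hyna.2.1
      omega
    · rw [(hget y hynn).2 hyna] at hyneg
      exact hyneg
  · have := (hget x (pv_inG_nonneg hxna.1)).1 hxna
    have hneg := hxna.2.1
    simp only [decide_eq_false_iff_not, not_lt]
    rw [this]
    omega

-- under the invariant, B's sweep finds exactly the cells adjacent to A's frontier
lemma pv_mem_bToFlip (R W : Nat) (m : List (List Int)) (S : List (Int × Int))
    (hInv : pvInv R W m S) (x : Int × Int) :
    x ∈ bToFlip m R W ↔ pvNA R W m S x := by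
  unfold bToFlip bHasPosNbr
  simp only [List.mem_filter, pv_mem_bCells, Bool.and_eq_true, decide_eq_true_eq,
    List.any_eq_true]
  constructor
  · rintro ⟨hin, hneg, q, hq, h1, h2, h3, h4, h5⟩
    have hqin : pvInG R W q := ⟨h1, h2, h3, h4⟩
    have hqS : q ∈ S := hInv.2 x q hin hneg hqin hq h5
    exact ⟨hin, hneg, q, hqS, (pv_bNbrs_symm x q).mp hq⟩
  · rintro ⟨hin, hneg, s, hs, hadj⟩
    obtain ⟨hsin, hspos⟩ := hInv.1 s hs
    exact ⟨hin, hneg, s, (pv_bNbrs_symm s x).mp hadj,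
      hsin.1, hsin.2.1, hsin.2.2.1, hsin.2.2.2, hspos⟩

-- ---- the two loops, round for round (A runs exactly one more pass than B) ----
lemma pv_loops_agree (R W : Nat) (fA : Nat) :
    ∀ (fB : Nat) (m : List (List Int)) (S : List (Int × Int)) (pA pB : Int),
    m.length = R → pvWidth m = W →
    pvInv R W m S → S ≠ [] →
    pvNegCount R W m + 1 ≤ fA → pvNegCount R W m + 1 ≤ fB →
    ((outerLoop fA m S pA).1.length = R ∧ pvWidth (outerLoop fA m S pA).1 = W) ∧
    (outerLoop fA m S pA).1 = (bLoop R W fB m pB).1 ∧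
    (outerLoop fA m S pA).2 + pB = (bLoop R W fB m pB).2 + pA + 1 := by
  induction fA with
  | zero =>
    intro fB m S pA pB _ _ _ _ hfA _
    exact (Nat.not_succ_le_zero _ hfA).elim
  | succ fA ih =>
    intro fB m S pA pB hR hW hInv hS hfA hfB
    obtain ⟨fB', rfl⟩ : ∃ k, fB = k + 1 := ⟨fB - 1, by omega⟩
    have hSne : S.isEmpty = false := by
      cases h : S
      · exact absurd h hS
      · rfl
    have hstep : outerLoop (fA+1) m S pA =
        outerLoop fA (passLoop S.length m S []).1 (passLoop S.length m S []).2 (pA + 1) := by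
      simp [outerLoop, hSne]
    rw [hstep, pv_passLoop_eq S m []]
    obtain ⟨hsh, hget, hsec⟩ := pv_passRev_char S.reverse m []
    have hNArev : ∀ q, pvNA m.length (pvWidth m) m S.reverse q ↔ pvNA R W m S q := by
      intro q
      unfold pvNA
      rw [hR, hW]
      simp [List.mem_reverse]
    simp only [hNArev] at hget hsec
    have htf : ∀ x, x ∈ bToFlip m R W ↔ pvNA R W m S x := pv_mem_bToFlip R W m S hInv
    have hT : ∀ x, x ∈ (passRev S.reverse m []).2 ↔ pvNA R W m S x := by
      intro x
      rw [hsec x]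
      simp
    by_cases hempty : ∀ x, ¬ pvNA R W m S x
    · have hm' : (passRev S.reverse m []).1 = m :=
        pv_eq_of_shape_get m _ m hsh (pv_shape_refl m)
          (fun p hp => (hget p hp).2 (hempty p))
    
      have hsec' : (passRev S.reverse m []).2 = [] :=
        List.eq_nil_iff_forall_not_mem.mpr (fun y hy => hempty y ((hT y).mp hy))
      have htfe : bToFlip m R W = [] :=
        List.eq_nil_iff_forall_not_mem.mpr (fun y hy => hempty y ((htf y).mp hy))
      rw [hsec', hm', pv_outerLoop_nil]
      rw [show bLoop R W (fB'+1) m pB = (m, pB) from by simp [bLoop, htfe]]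
      exact ⟨⟨hR, hW⟩, rfl, by omega⟩
    · push_neg at hempty
      obtain ⟨w, hw⟩ := hempty
      have hwmem : w ∈ bToFlip m R W := (htf w).mpr hw
      have htfne : (bToFlip m R W).isEmpty = false := by
        cases h : bToFlip m R W
        · rw [h] at hwmem; simp at hwmem
        · rfl
      rw [show bLoop R W (fB'+1) m pB =
        bLoop R W fB' (bFlipAll m (bToFlip m R W)) (pB+1) from by simp [bLoop, htfne]]
      have htfprops : ∀ x ∈ bToFlip m R W, pvNonneg x ∧ pvGetP m x < 0 := fun x hx =>
        ⟨pv_inG_nonneg ((htf x).mp hx).1, ((htf x).mp hx).2.1⟩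
      have htfnd : (bToFlip m R W).Nodup := (pv_nodup_bCells R W).filter _
      obtain ⟨hshB, hgetB⟩ := pv_flipAll_char (bToFlip m R W) m htfnd htfprops
      have hmeq : (passRev S.reverse m []).1 = bFlipAll m (bToFlip m R W) := by
        apply pv_eq_of_shape_get m _ _ hsh hshB
        intro p hp
        by_cases hna : pvNA R W m S p
        · rw [(hget p hp).1 hna, (hgetB p hp).1 ((htf p).mpr hna)]
        · rw [(hget p hp).2 hna, (hgetB p hp).2 (fun h => hna ((htf p).mp h))]
      have hInv' : pvInv R W (passRev S.reverse m []).1 (passRev S.reverse m []).2 :=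
        pv_inv_preserved R W m _ S _ hInv hget hT
      have hSne' : (passRev S.reverse m []).2 ≠ [] := fun he => by
        have hm : w ∈ (passRev S.reverse m []).2 := (hT w).mpr hw
        rw [he] at hm
        simp at hm
      have hlt : pvNegCount R W (passRev S.reverse m []).1 < pvNegCount R W m :=
        pv_negCount_lt R W m _ S hget w hw
      have hsh1 : (passRev S.reverse m []).1.length = R := by rw [hsh.1, hR]
      have hshW : pvWidth (passRev S.reverse m []).1 = W := by rw [pv_width_of_shape hsh, hW]
      have hrec := ih fB' (passRev S.reverse m []).1 (passRev S.reverse m []).2 (pA+1) (pB+1)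
        hsh1 hshW hInv' hSne' (by omega) (by omega)
      rw [← hmeq]
      exact ⟨hrec.1, hrec.2.1, by omega⟩

lemma pv_anyCells_iff (R W : Nat) (f : Int × Int → Bool) :
    ((bCells R W).any f = true) ↔ ∃ p, pvInG R W p ∧ f p = true := by
  simp only [List.any_eq_true, pv_mem_bCells]

lemma pv_getAllPositives_eq (m : List (List Int)) :
    getAllPositives m =
      (bCells m.length (pvWidth m)).filter (fun p => decide (0 < pvGetP m p)) := by
  unfold getAllPositives bCells
  simp only [PySem.List.foldl_append_ite, PySem.List.foldl_append_eq_flatMap, List.nil_append]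
  simp [List.filter_flatMap, List.filter_map, Int.ofNat_eq_natCast]
  rfl

lemma pv_containsNeg_iff (m : List (List Int)) :
    containsNeg m = true ↔
      ∃ p : Int × Int, pvInG m.length (pvWidth m) p ∧ pvGetP m p < 0 := by
  unfold containsNeg
  simp only [List.any_eq_true, List.mem_range, decide_eq_true_eq]
  constructor
  · rintro ⟨r, hr, c, hc, h⟩
    refine ⟨(Int.ofNat r, Int.ofNat c),
      ⟨Int.natCast_nonneg r, ?_, Int.natCast_nonneg c, ?_⟩, h⟩
    · show (r : Int) < (m.length : Int)
      exact_mod_cast hr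
    · show (c : Int) < (pvWidth m : Int)
      exact_mod_cast hc
  · rintro ⟨p, hin, hneg⟩
    obtain ⟨h1, h2, h3, h4⟩ := hin
    refine ⟨p.1.toNat, by omega, p.2.toNat, by omega, ?_⟩
    simp only [pvGetP, Int.ofNat_eq_natCast, Int.toNat_natCast]
    exact hneg

lemma pv_length_bCells (R W : Nat) : (bCells R W).length = R * W := by
  induction R with
  | zero => simp [bCells]
  | succ n ih =>
    rw [show bCells (n+1) W = bCells n W ++ (List.range W).map
        (fun c => (Int.ofNat n, Int.ofNat c)) from by
      rw [bCells, List.range_succ, List.flatMap_append, List.flatMap_singleton]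
      rfl]
    simp [ih, Nat.succ_mul]

lemma pv_negCount_le (R W : Nat) (m : List (List Int)) : pvNegCount R W m ≤ R * W := by
  unfold pvNegCount
  calc ((bCells R W).filter _).length ≤ (bCells R W).length := List.length_filter_le _ _
  _ = R * W := pv_length_bCells R W

-- ===== VERDICT (by name: the statement is the Claim_ definition above) =====
theorem minimum_passes_2_spec : Claim_equal_minimum_passes_2 := by
  unfold Claim_equal_minimum_passes_2
  intro matrix _ _
  simp only [Spec_minimum_passes_2, minimum_passes_2, minimum_passes_2_alt]
  by_cases hpos : ∃ p, pvInG matrix.length (pvWidth matrix) p ∧ 0 < pvGetP matrix p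
  · have hposB : ((bCells matrix.length (pvWidth matrix)).any fun p =>
        decide (0 < pvGetP matrix p)) = true := by
      rw [pv_anyCells_iff]
      obtain ⟨p, h1, h2⟩ := hpos
      exact ⟨p, h1, by simpa using h2⟩
    obtain ⟨p0, hp0in, hp0pos⟩ := hpos
    have hstackne : getAllPositives matrix ≠ [] := by
      rw [pv_getAllPositives_eq]
      intro he
      have hmem : p0 ∈ (bCells matrix.length (pvWidth matrix)).filter
          (fun p => decide (0 < pvGetP matrix p)) :=
        List.mem_filter.mpr ⟨(pv_mem_bCells _ _ p0).mpr hp0in, by simpa using hp0pos⟩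
      rw [he] at hmem
      simp at hmem
    have hInv0 : pvInv matrix.length (pvWidth matrix) matrix (getAllPositives matrix) := by
      constructor
      · intro p hp
        rw [pv_getAllPositives_eq] at hp
        have hm := List.mem_filter.mp hp
        exact ⟨(pv_mem_bCells _ _ p).mp hm.1, by simpa using hm.2⟩
      · intro x q _ _ hq _ hqpos
        rw [pv_getAllPositives_eq]
        exact List.mem_filter.mpr ⟨(pv_mem_bCells _ _ q).mpr hq, by simpa using hqpos⟩
    have hfuel : pvNegCount matrix.length (pvWidth matrix) matrix + 1 ≤
        matrix.length * pvWidth matrix + 2 := by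
      have := pv_negCount_le matrix.length (pvWidth matrix) matrix
      omega
    obtain ⟨⟨hlenf, hWf⟩, hmeq, hcount⟩ :=
      pv_loops_agree matrix.length (pvWidth matrix) (matrix.length * pvWidth matrix + 2)
        (matrix.length * pvWidth matrix + 2) matrix (getAllPositives matrix) 0 0 rfl rfl
        hInv0 hstackne hfuel hfuel
    have hcneg : containsNeg (outerLoop (matrix.length * pvWidth matrix + 2) matrix
          (getAllPositives matrix) 0).1 =
        ((bCells matrix.length (pvWidth matrix)).any fun p =>
          decide (pvGetP (bLoop matrix.length (pvWidth matrix)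
            (matrix.length * pvWidth matrix + 2) matrix 0).1 p < 0)) := by
      rw [← hmeq]
      apply Bool.eq_iff_iff.mpr
      rw [pv_containsNeg_iff, pv_anyCells_iff, hlenf, hWf]
      simp
    rw [hposB, hcneg]
    simp only [Bool.not_true, Bool.false_eq_true, if_false]
    split_ifs with h
    · rfl
    · omega
  · have hstack : getAllPositives matrix = [] := by
      rw [pv_getAllPositives_eq]
      apply List.eq_nil_iff_forall_not_mem.mpr
      intro p hp
      have hm := List.mem_filter.mp hp
      exact hpos ⟨p, (pv_mem_bCells _ _ p).mp hm.1, by simpa using hm.2⟩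
    have hposB : ((bCells matrix.length (pvWidth matrix)).any fun p =>
        decide (0 < pvGetP matrix p)) = false := by
      rw [Bool.eq_false_iff]
      intro h
      rw [pv_anyCells_iff] at h
      obtain ⟨p, h1, h2⟩ := h
      exact hpos ⟨p, h1, by simpa using h2⟩
    rw [hstack, pv_outerLoop_nil, hposB]
    simp only [Bool.not_false, if_true]
    split_ifs <;> omega
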